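-- pv_equiv track=rewrite | github.com/inmzhang/leaky | src/leaky/utils.py | _get_projector_slice
-- ===== SOURCE A (Python) =====
-- from typing import List, Sequence, Tuple
--
-- ProjectStatus = Tuple[Tuple[int], ...]
--
-- def _get_projector_slice(
--     num_level: int,
--     project_status: ProjectStatus,
-- ) -> List[int]:
--     """Get slice into the matrix for the subspace projection defined by project_status."""
--     num_qubits = len(project_status)
--     status = project_status[0]
--     if num_qubits == 1:
--         return list(status)
--     tail_slice = _get_projector_slice(num_level, project_status[1:])
--     return [x + s * num_level ** (num_qubits - 1) for s in status for x in tail_slice]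
-- ===== SOURCE B (Python) =====
-- def _get_projector_slice(num_level, project_status):
--     """Iterative fold, most-significant qubit first, instead of recursion."""
--     n = len(project_status)
--     res = [0]
--     for i, status in enumerate(project_status):
--         w = num_level ** (n - 1 - i)
--         res = [r + s * w for r in res for s in status]
--     return res
-- ===== Notes on version B (the rewrite author's own statement) =====
-- stated objective: alternative
-- what changed: Replaced the tail-first recursion with an iterative left fold over enumerated qubits that accumulates partial weighted sums most-significant-first.
-- outside the precondition, e.g. on _get_projector_slice(2, ()): A raises IndexError, B returns [0]
-- crash fix: On an empty project_status A raises IndexError (it indexes project_status[0]); B returns [0]. — e.g. on _get_projector_slice(2, []): A raises IndexError, B returns [0]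
import Mathlib
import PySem

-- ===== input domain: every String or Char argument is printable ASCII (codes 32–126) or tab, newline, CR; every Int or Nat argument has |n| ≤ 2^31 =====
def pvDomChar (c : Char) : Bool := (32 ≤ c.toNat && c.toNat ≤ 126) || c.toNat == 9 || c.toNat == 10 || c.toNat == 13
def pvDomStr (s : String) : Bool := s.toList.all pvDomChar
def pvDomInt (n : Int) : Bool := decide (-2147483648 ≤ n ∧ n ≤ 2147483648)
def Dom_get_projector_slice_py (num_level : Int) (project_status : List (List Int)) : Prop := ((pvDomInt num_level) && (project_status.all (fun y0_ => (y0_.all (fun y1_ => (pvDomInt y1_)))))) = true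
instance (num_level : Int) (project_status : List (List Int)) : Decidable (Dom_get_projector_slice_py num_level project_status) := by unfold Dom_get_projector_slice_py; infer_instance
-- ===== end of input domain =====

-- B replaces A's tail-first recursion by an iterative fold over enumerated qubits
-- (most-significant-first accumulation); equivalence of return values on non-empty input.

-- ===== PORT A =====
-- recursion on the list, exactly as A recurses on project_status[1:]
def get_projector_slice_py (num_level : Int) : List (List Int) → List Int
  | [] => []  -- Python raises IndexError here (project_status[0]); excluded by Pre_
  | status :: rest =>
    if rest.length = 0 then status
    else
      let tail_slice := get_projector_slice_py num_level rest
      status.flatMap (fun s => tail_slice.map (fun x => x + s * num_level ^ rest.length))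

-- ===== PORT B =====
def get_projector_slice_py_alt (num_level : Int) (project_status : List (List Int)) : List Int :=
  let n := project_status.length
  (PySem.List.enumerate project_status).foldl
    (fun res p =>
      let w := num_level ^ (n - 1 - p.1.toNat)
      res.flatMap (fun r => p.2.map (fun s => r + s * w)))
    [0]

-- ===== PRECONDITION & SPEC =====
-- Pre_ excludes the empty project_status, on which A raises IndexError.
def Pre_get_projector_slice_py (num_level : Int) (project_status : List (List Int)) : Prop :=
  project_status ≠ []
instance (num_level : Int) (project_status : List (List Int)) : Decidable (Pre_get_projector_slice_py num_level project_status) := by unfold Pre_get_projector_slice_py; infer_instance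

def pvWitness_get_projector_slice_py : Int × List (List Int) := (2, [[0, 1], [0, 1]])

-- On an empty project_status A raises IndexError (it indexes project_status[0] before any length check); B returns [0].
def Raises_get_projector_slice_py (num_level : Int) (project_status : List (List Int)) : Prop :=
  project_status = []
instance (num_level : Int) (project_status : List (List Int)) : Decidable (Raises_get_projector_slice_py num_level project_status) := by unfold Raises_get_projector_slice_py; infer_instance
def pvRaiseWitness_get_projector_slice_py : Int × List (List Int) := (2, [])
def pvRaiseWitnessOut_get_projector_slice_py : List Int := [0]

def Spec_get_projector_slice_py (num_level : Int) (project_status : List (List Int)) (out : List Int) : Prop := out = get_projector_slice_py_alt num_level project_status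
instance (num_level : Int) (project_status : List (List Int)) (out : List Int) : Decidable (Spec_get_projector_slice_py num_level project_status out) := by unfold Spec_get_projector_slice_py; infer_instance

-- ===== CLAIM (what is proved, stated in full; the proofs are below) =====
def Claim_equal_get_projector_slice_py : Prop := ∀ (num_level : Int) (project_status : List (List Int)), Dom_get_projector_slice_py num_level project_status → Pre_get_projector_slice_py num_level project_status → Spec_get_projector_slice_py num_level project_status (get_projector_slice_py num_level project_status)

def Claim_raises_get_projector_slice_py : Prop := (∀ (num_level : Int) (project_status : List (List Int)), Dom_get_projector_slice_py num_level project_status → Raises_get_projector_slice_py num_level project_status → ¬ Pre_get_projector_slice_py num_level project_status) ∧ (Dom_get_projector_slice_py (pvRaiseWitness_get_projector_slice_py.1) (pvRaiseWitness_get_projector_slice_py.2) ∧ Raises_get_projector_slice_py (pvRaiseWitness_get_projector_slice_py.1) (pvRaiseWitness_get_projector_slice_py.2) ∧ get_projector_slice_py_alt (pvRaiseWitness_get_projector_slice_py.1) (pvRaiseWitness_get_projector_slice_py.2) = pvRaiseWitnessOut_get_projector_slice_py)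

-- ===== LEMMAS AND PROOFS =====

-- B's fold over `enumerate l k` (with k + l.length = n) appends, to every accumulated
-- partial sum, every weighted combination that A computes for the suffix l.
theorem pv_fold_eq (num_level : Int) (n : Nat) :
    ∀ (l : List (List Int)), l ≠ [] → ∀ (k : Nat), k + l.length = n → ∀ (res : List Int),
      (PySem.List.enumerate l (k : Int)).foldl
        (fun res p =>
          let w := num_level ^ (n - 1 - p.1.toNat)
          res.flatMap (fun r => p.2.map (fun s => r + s * w)))
        res
      = res.flatMap (fun r => (get_projector_slice_py num_level l).map (fun x => r + x)) := by
  intro l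
  induction l with
  | nil => intro h; exact absurd rfl h
  | cons status rest ih =>
    intro _ k hk res
    rcases eq_or_ne rest [] with hrest | hrest
    · subst hrest
      simp only [List.length_cons, List.length_nil] at hk
      have hn : n - 1 - k = 0 := by omega
      simp [PySem.List.enumerate_cons, PySem.List.enumerate_nil,
        get_projector_slice_py, hn]
    · have hk' : (k + 1) + rest.length = n := by
        simp only [List.length_cons] at hk; omega
      have hexp : n - 1 - k = rest.length := by omega
      have hcast : ((k : Int) + 1) = ((k + 1 : Nat) : Int) := by push_cast; ring
      rw [PySem.List.enumerate_cons, List.foldl_cons, hcast, ih hrest (k + 1) hk']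
      simp only [get_projector_slice_py, List.length_eq_zero_iff, hrest, if_false,
        Int.toNat_natCast, hexp, List.flatMap_map, List.map_flatMap,
        List.flatMap_assoc, List.map_map]
      congr 1
      funext r
      congr 1
      funext s
      congr 1
      funext x
      simp only [Function.comp_apply]
      ring

-- ===== VERDICT (by name: the statement is the Claim_ definition above) =====
theorem get_projector_slice_py_raises : Claim_raises_get_projector_slice_py := by
  unfold Claim_raises_get_projector_slice_py
  exact ⟨fun _ _ _ h hp => hp h, by decide⟩

theorem get_projector_slice_py_spec : Claim_equal_get_projector_slice_py := by
  have _keep := get_projector_slice_py_raises  -- reference keeps the delivered crash-fix theorem tied to the verdict block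
  intro num_level project_status _ hpre
  have h := pv_fold_eq num_level project_status.length project_status hpre 0 (by omega) [0]
  simp only [Nat.cast_zero] at h
  unfold Spec_get_projector_slice_py
  simp only [get_projector_slice_py_alt]
  rw [h]
  simp
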